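-- pv_equiv track=rewrite | github.com/shuowenwei/LeetCodePython | OutOfLeetCode/countSubsets.py | countSubset2Pointers
-- ===== SOURCE A (Python) =====
-- def countSubset2Pointers(nums, K):
--     n = len(nums)
--     nums.sort()
--     left = 0
--     right = len(nums) - 1
--     res = 0
--     for i in range(n):
--         for j in range(i, n):
--             if nums[i] + nums[j] < K:
--                 res += 2 ** (max(j - i - 1, 0))
--     return res
-- ===== SOURCE B (Python) =====
-- def countSubset2Pointers(nums, K):
--     nums.sort()
--     res = 0
--     left = 0
--     right = len(nums) - 1
--     while left <= right:
--         if nums[left] + nums[right] < K: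
--             res += 1 << (right - left)
--             left += 1
--         else:
--             right -= 1
--     return res
-- ===== Notes on version B (the rewrite author's own statement) =====
-- stated objective: faster
-- what changed: Replaces the O(n^2) double loop over all (i,j) pairs by the classic sorted two-pointer sweep: for each left the inner weighted sum collapses to a single power 2^(right-left), so one pass after sorting suffices.
import Mathlib
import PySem

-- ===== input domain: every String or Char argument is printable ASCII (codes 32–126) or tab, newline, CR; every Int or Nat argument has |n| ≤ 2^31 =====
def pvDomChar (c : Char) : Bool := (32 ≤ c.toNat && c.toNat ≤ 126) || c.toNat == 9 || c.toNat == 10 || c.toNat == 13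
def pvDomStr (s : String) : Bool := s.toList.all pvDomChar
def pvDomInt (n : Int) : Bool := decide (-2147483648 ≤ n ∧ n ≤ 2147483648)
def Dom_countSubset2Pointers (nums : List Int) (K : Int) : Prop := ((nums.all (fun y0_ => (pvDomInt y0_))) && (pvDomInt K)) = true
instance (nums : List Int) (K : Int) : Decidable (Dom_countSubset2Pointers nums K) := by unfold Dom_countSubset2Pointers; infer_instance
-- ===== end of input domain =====

-- B replaces A's O(n^2) double loop by the classic sorted two-pointer sweep (the inner
-- weighted sum collapses to 2^(right-left)); both sort `nums` in place, the claim is about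
-- the return value.

-- ===== PORT A =====
-- literal transliteration of A: sort, then the nested index loops
-- (A's `left`/`right` variables are dead code and are not carried).
def countSubset2Pointers (nums : List Int) (K : Int) : Int :=
  let n : Int := (nums.length : Int)
  let s : List Int := PySem.List.sorted nums (fun x => x) false
  let res : Int := 0
  (PySem.List.pyRange 0 n 1).foldl (fun res i =>
    (PySem.List.pyRange i n 1).foldl (fun res j =>
      if PySem.List.pyGetD s i 0 + PySem.List.pyGetD s j 0 < K then
        res + 2 ^ (max (j - i - 1) 0).toNat
      else res) res) res

-- ===== PORT B =====
-- the `while left <= right` loop of Source B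
def pvAltLoop (s : List Int) (K : Int) (left right res : Int) : Int :=
  if left ≤ right then
    if PySem.List.pyGetD s left 0 + PySem.List.pyGetD s right 0 < K then
      pvAltLoop s K (left + 1) right (res + ((1 : Int) <<< (right - left).toNat))
    else
      pvAltLoop s K left (right - 1) res
  else res
termination_by (right + 1 - left).toNat
decreasing_by all_goals omega

def countSubset2Pointers_alt (nums : List Int) (K : Int) : Int :=
  let s : List Int := PySem.List.sorted nums (fun x => x) false
  pvAltLoop s K 0 ((s.length : Int) - 1) 0

-- ===== PRECONDITION & SPEC =====
def Spec_countSubset2Pointers (nums : List Int) (K : Int) (out : Int) : Prop := out = countSubset2Pointers_alt nums K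
instance (nums : List Int) (K : Int) (out : Int) : Decidable (Spec_countSubset2Pointers nums K out) := by unfold Spec_countSubset2Pointers; infer_instance

-- ===== CLAIM (what is proved, stated in full; the proofs are below) =====
def Claim_equal_countSubset2Pointers : Prop := ∀ (nums : List Int) (K : Int), Dom_countSubset2Pointers nums K → Spec_countSubset2Pointers nums K (countSubset2Pointers nums K)

-- ===== LEMMAS AND PROOFS =====

-- A's summand for the pair (i, j), and A's row sum for a fixed i
def pvG (s : List Int) (K i j : Int) : Int :=
  if PySem.List.pyGetD s i 0 + PySem.List.pyGetD s j 0 < K then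
    2 ^ (max (j - i - 1) 0).toNat
  else 0

def pvRow (s : List Int) (K i : Int) : Int :=
  ((PySem.List.pyRange i (s.length : Int) 1).map (pvG s K i)).sum

-- a foldl whose body conditionally adds is an init plus a sum
theorem pv_foldl_if (s : List Int) (K i : Int) (xs : List Int) (a : Int) :
    xs.foldl (fun res j =>
      if PySem.List.pyGetD s i 0 + PySem.List.pyGetD s j 0 < K then
        res + 2 ^ (max (j - i - 1) 0).toNat
      else res) a = a + (xs.map (pvG s K i)).sum := by
  have : (fun (res : Int) (j : Int) =>
      if PySem.List.pyGetD s i 0 + PySem.List.pyGetD s j 0 < K then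
        res + 2 ^ (max (j - i - 1) 0).toNat
      else res) = fun res j => res + pvG s K i j := by
    funext res j
    simp only [pvG]
    split <;> simp
  rw [this, PySem.List.foldl_add]

-- monotone access into a sorted list
theorem pv_mono (s : List Int) (hs : s.Pairwise (· ≤ ·)) (p q : Int)
    (h0 : 0 ≤ p) (hpq : p ≤ q) (hq : q < (s.length : Int)) :
    PySem.List.pyGetD s p 0 ≤ PySem.List.pyGetD s q 0 := by
  rw [PySem.List.pyGetD_eq_getElem s 0 h0 (by omega),
      PySem.List.pyGetD_eq_getElem s 0 (by omega) hq]
  rcases eq_or_lt_of_le hpq with h | h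
  · subst h; exact le_refl _
  · exact (List.pairwise_iff_getElem.mp hs) p.toNat q.toNat (by omega) (by omega) (by omega)

-- geometric row: sum over j in [l, l+k+1) of 2^max(j-l-1,0) is 2^k
theorem pv_geom (k : Nat) (l : Int) :
    ((PySem.List.pyRange l (l + (k : Int) + 1) 1).map
      (fun j => ((2 : Int) ^ (max (j - l - 1) 0).toNat))).sum = 2 ^ k := by
  induction k with
  | zero =>
      rw [show l + ((0 : Nat) : Int) + 1 = l + 1 by omega, PySem.List.pyRange_one_singleton]
      simp
  | succ k ih =>
      rw [show l + ((k + 1 : Nat) : Int) + 1 = (l + (k : Int) + 1) + 1 by push_cast; ring,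
          PySem.List.pyRange_one_succ_right (by omega)]
      rw [List.map_append, List.sum_append, ih]
      simp only [List.map_cons, List.map_nil, List.sum_cons, List.sum_nil]
      rw [show max (l + (k : Int) + 1 - l - 1) 0 = (k : Int) by omega]
      rw [Int.toNat_natCast, pow_succ]
      ring

-- the two-pointer loop computes the remaining rows of A's double sum
theorem pv_loop (s : List Int) (K : Int) (hs : s.Pairwise (· ≤ ·)) (m : Nat) :
    ∀ l r res : Int, (r + 1 - l).toNat = m → 0 ≤ l → r < (s.length : Int) →
    (∀ i j : Int, l ≤ i → i < (s.length : Int) → r < j → j < (s.length : Int) →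
      K ≤ PySem.List.pyGetD s i 0 + PySem.List.pyGetD s j 0) →
    pvAltLoop s K l r res =
      res + ((PySem.List.pyRange l (s.length : Int) 1).map (pvRow s K)).sum := by
  induction m with
  | zero =>
      intro l r res hm h0 hr hInv
      have hlr : r < l := by omega
      rw [pvAltLoop]
      rw [if_neg (by omega)]
      have hz : ((PySem.List.pyRange l (s.length : Int) 1).map (pvRow s K)).sum = 0 := by
        apply List.sum_eq_zero
        intro x hx
        rcases List.mem_map.mp hx with ⟨i, hi, rfl⟩
        rcases PySem.List.mem_pyRange_one.mp hi with ⟨hli, hin⟩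
        apply List.sum_eq_zero
        intro y hy
        rcases List.mem_map.mp hy with ⟨j, hj, rfl⟩
        rcases PySem.List.mem_pyRange_one.mp hj with ⟨hij, hjn⟩
        have := hInv i j hli hin (by omega) hjn
        simp only [pvG]
        rw [if_neg (by omega)]
      omega
  | succ m ih =>
      intro l r res hm h0 hr hInv
      have hlr : l ≤ r := by omega
      rw [pvAltLoop, if_pos hlr]
      by_cases hc : PySem.List.pyGetD s l 0 + PySem.List.pyGetD s r 0 < K
      · rw [if_pos hc]
        rw [ih (l + 1) r (res + ((1 : Int) <<< (r - l).toNat)) (by omega) (by omega) hr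
            (fun i j hi hin hj hjn => hInv i j (by omega) hin hj hjn)]
        rw [PySem.List.pyRange_one_cons (by omega : l < (s.length : Int)),
            List.map_cons, List.sum_cons]
        have hrow : pvRow s K l = (1 : Int) <<< (r - l).toNat := by
          unfold pvRow
          rw [PySem.List.pyRange_one_append l (r + 1) (s.length : Int) (by omega) (by omega),
              List.map_append, List.sum_append]
          have h2 : ((PySem.List.pyRange (r + 1) (s.length : Int) 1).map (pvG s K l)).sum = 0 := by
            apply List.sum_eq_zero
            intro y hy
            rcases List.mem_map.mp hy with ⟨j, hj, rfl⟩
            rcases PySem.List.mem_pyRange_one.mp hj with ⟨hij, hjn⟩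
            have := hInv l j (le_refl l) (by omega) (by omega) hjn
            simp only [pvG]
            rw [if_neg (by omega)]
          have h1 : ((PySem.List.pyRange l (r + 1) 1).map (pvG s K l)).sum
              = ((PySem.List.pyRange l (r + 1) 1).map
                  (fun j => ((2 : Int) ^ (max (j - l - 1) 0).toNat))).sum := by
            apply congrArg
            apply List.map_congr_left
            intro j hj
            rcases PySem.List.mem_pyRange_one.mp hj with ⟨hlj, hjr⟩
            have hjr' : PySem.List.pyGetD s j 0 ≤ PySem.List.pyGetD s r 0 :=
              pv_mono s hs j r (by omega) (by omega) hr
            simp only [pvG]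
            rw [if_pos (by omega)]
          rw [h1, h2, show r + 1 = l + ((r - l).toNat : Int) + 1 by omega,
              pv_geom ((r - l).toNat) l, Int.shiftLeft_eq]
          ring
        rw [hrow]; ring
      · rw [if_neg hc]
        rw [ih l (r - 1) res (by omega) h0 (by omega)]
        intro i j hi hin hj hjn
        by_cases hjr : r < j
        · exact hInv i j hi hin hjr hjn
        · have hj' : j = r := by omega
          subst hj'
          have : PySem.List.pyGetD s l 0 ≤ PySem.List.pyGetD s i 0 :=
            pv_mono s hs l i h0 hi hin
          omega

-- ===== VERDICT (by name: the statement is the Claim_ definition above) =====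
theorem countSubset2Pointers_spec : Claim_equal_countSubset2Pointers := by
  intro nums K _
  unfold Spec_countSubset2Pointers countSubset2Pointers countSubset2Pointers_alt
  simp only []
  set s : List Int := PySem.List.sorted nums (fun x => x) false with hsdef
  have hlen : (s.length : Int) = (nums.length : Int) := by
    rw [hsdef, PySem.List.length_sorted]
  have hs : s.Pairwise (· ≤ ·) := by
    have := PySem.List.sorted_pairwise nums (fun x => x)
    simpa [hsdef] using this
  -- A's side: nested foldl = sum of rows
  have hA : (PySem.List.pyRange 0 (nums.length : Int) 1).foldl (fun res i =>
      (PySem.List.pyRange i (nums.length : Int) 1).foldl (fun res j =>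
        if PySem.List.pyGetD s i 0 + PySem.List.pyGetD s j 0 < K then
          res + 2 ^ (max (j - i - 1) 0).toNat
        else res) res) 0
      = ((PySem.List.pyRange 0 (s.length : Int) 1).map (pvRow s K)).sum := by
    have hbody : (fun (res i : Int) =>
        (PySem.List.pyRange i (nums.length : Int) 1).foldl (fun res j =>
          if PySem.List.pyGetD s i 0 + PySem.List.pyGetD s j 0 < K then
            res + 2 ^ (max (j - i - 1) 0).toNat
          else res) res) = fun res i => res + pvRow s K i := by
      funext res i
      rw [pv_foldl_if]
      unfold pvRow
      rw [hlen]
    rw [hbody, PySem.List.foldl_add, hlen]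
    simp
  rw [hA]
  -- B's side: the two-pointer loop
  rw [pv_loop s K hs ((s.length : Int) - 1 + 1 - 0).toNat 0 ((s.length : Int) - 1) 0 rfl
      (le_refl 0) (by omega) (fun i j hi hin hj hjn => absurd hjn (by omega))]
  ring
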